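-- pv_equiv track=rewrite | github.com/nih-fmrif/osmium_backend | fmrif_archive/utils.py | get_fmrif_scanner
-- ===== SOURCE A (Python) =====
-- def get_fmrif_scanner(curr_scanner):
--
--     scanners = {
--         "fmrif3ta": ["3TaFMRI", "fmrif3ta", "fmri3Ta"],
--         "fmrif3tb": ["fmri3Tb", "fmrif3tb"],
--         "fmrif3tc": ["fmrif3tc", "fmri3Tc", "DISCOVERY MR750"],
--         "fmrif3td": ["AWP45160", "Skyra"],
--         "fmrif7t": ["FMRIFD7T", "Investigational_Device_7T", "NMRF7T"]
--     }
--
--     for fmrif_scanner, station_names in scanners.items():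
--
--         if curr_scanner in station_names:
--             return fmrif_scanner
--
--     return None
-- ===== SOURCE B (Python) =====
-- # Binary search over a sorted flat (station_name, scanner_id) table
-- # instead of scanning each group's name list.
--
-- _SORTED_STATIONS = [
--     ("3TaFMRI", "fmrif3ta"),
--     ("AWP45160", "fmrif3td"),
--     ("DISCOVERY MR750", "fmrif3tc"),
--     ("FMRIFD7T", "fmrif7t"),
--     ("Investigational_Device_7T", "fmrif7t"),
--     ("NMRF7T", "fmrif7t"),
--     ("Skyra", "fmrif3td"),
--     ("fmri3Ta", "fmrif3ta"),
--     ("fmri3Tb", "fmrif3tb"),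
--     ("fmri3Tc", "fmrif3tc"),
--     ("fmrif3ta", "fmrif3ta"),
--     ("fmrif3tb", "fmrif3tb"),
--     ("fmrif3tc", "fmrif3tc"),
-- ]
--
--
-- def get_fmrif_scanner(curr_scanner):
--     lo, hi = 0, len(_SORTED_STATIONS)
--     while lo < hi:
--         mid = (lo + hi) // 2
--         name, scanner_id = _SORTED_STATIONS[mid]
--         if curr_scanner == name:
--             return scanner_id
--         elif curr_scanner < name:
--             hi = mid
--         else:
--             lo = mid + 1
--     return None
-- ===== Notes on version B (the rewrite author's own statement) =====
-- stated objective: alternative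
-- what changed: Replaces A's sequential scan of per-group name lists with a hand-written binary search (lo/hi while loop) over one flat (name, id) table pre-sorted by station name.
import Mathlib
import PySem

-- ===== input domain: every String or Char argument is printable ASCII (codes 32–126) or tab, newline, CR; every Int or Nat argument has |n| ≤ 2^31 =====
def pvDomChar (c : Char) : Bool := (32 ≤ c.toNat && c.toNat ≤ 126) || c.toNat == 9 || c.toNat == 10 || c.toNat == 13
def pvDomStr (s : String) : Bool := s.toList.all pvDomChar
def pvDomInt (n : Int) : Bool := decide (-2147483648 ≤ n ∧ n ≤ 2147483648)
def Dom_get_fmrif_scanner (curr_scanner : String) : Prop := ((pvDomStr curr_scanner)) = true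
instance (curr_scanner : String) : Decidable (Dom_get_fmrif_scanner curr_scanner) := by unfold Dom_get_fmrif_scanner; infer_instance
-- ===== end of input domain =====

-- B replaces A's linear scan of per-group name lists with a binary search over one flat
-- sorted (name, id) table — a different algorithm of similar cost on this tiny fixed table.

-- ===== PORT A =====
def pvScanners : List (String × List String) :=
  [("fmrif3ta", ["3TaFMRI", "fmrif3ta", "fmri3Ta"]),
   ("fmrif3tb", ["fmri3Tb", "fmrif3tb"]),
   ("fmrif3tc", ["fmrif3tc", "fmri3Tc", "DISCOVERY MR750"]),
   ("fmrif3td", ["AWP45160", "Skyra"]),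
   ("fmrif7t", ["FMRIFD7T", "Investigational_Device_7T", "NMRF7T"])]

-- the 'for … in scanners.items(): if curr_scanner in station_names: return …' loop
def pvLoopA : List (String × List String) → String → Option String
  | [], _ => none
  | (fmrif_scanner, station_names) :: rest, curr =>
      if station_names.contains curr then some fmrif_scanner else pvLoopA rest curr

def get_fmrif_scanner (curr_scanner : String) : Option String :=
  pvLoopA pvScanners curr_scanner

-- ===== PORT B =====
-- Source B's _SORTED_STATIONS: flat table sorted by station name (Python string order)
def pvTable : List (String × String) :=
  [("3TaFMRI", "fmrif3ta"),
   ("AWP45160", "fmrif3td"),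
   ("DISCOVERY MR750", "fmrif3tc"),
   ("FMRIFD7T", "fmrif7t"),
   ("Investigational_Device_7T", "fmrif7t"),
   ("NMRF7T", "fmrif7t"),
   ("Skyra", "fmrif3td"),
   ("fmri3Ta", "fmrif3ta"),
   ("fmri3Tb", "fmrif3tb"),
   ("fmri3Tc", "fmrif3tc"),
   ("fmrif3ta", "fmrif3ta"),
   ("fmrif3tb", "fmrif3tb"),
   ("fmrif3tc", "fmrif3tc")]

-- Source B's 'while lo < hi' binary-search loop; the fuel argument only makes the loop total
-- (hi - lo shrinks each iteration, so fuel = table length is never exhausted).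
def pvBisect : Nat → Nat → Nat → String → Option String
  | 0, _, _, _ => none
  | fuel + 1, lo, hi, s =>
      if lo < hi then
        let mid := (lo + hi) / 2
        let p := pvTable.getD mid ("", "")
        if s = p.1 then some p.2
        else if PySem.Chars.strLt s.toList p.1.toList then pvBisect fuel lo mid s  -- Python's s < name (code-point lexicographic)
        else pvBisect fuel (mid + 1) hi s
      else none

def get_fmrif_scanner_alt (curr_scanner : String) : Option String :=
  pvBisect pvTable.length 0 pvTable.length curr_scanner

-- ===== PRECONDITION & SPEC =====
def Spec_get_fmrif_scanner (curr_scanner : String) (out : Option String) : Prop := out = get_fmrif_scanner_alt curr_scanner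
instance (curr_scanner : String) (out : Option String) : Decidable (Spec_get_fmrif_scanner curr_scanner out) := by unfold Spec_get_fmrif_scanner; infer_instance

-- ===== CLAIM (what is proved, stated in full; the proofs are below) =====
def Claim_equal_get_fmrif_scanner : Prop := ∀ (curr_scanner : String), Dom_get_fmrif_scanner curr_scanner → Spec_get_fmrif_scanner curr_scanner (get_fmrif_scanner curr_scanner)

-- ===== LEMMAS AND PROOFS =====

-- binary search only ever returns an id found at a probed key equal to s,
-- so if s is none of the table's keys it returns none
theorem pvBisect_not_found (s : String) (h : ∀ p ∈ pvTable, s ≠ p.1) :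
    ∀ fuel lo hi, hi ≤ pvTable.length → pvBisect fuel lo hi s = none := by
  intro fuel
  induction fuel with
  | zero => intro lo hi _; rfl
  | succ n ih =>
    intro lo hi hle
    unfold pvBisect
    by_cases hlt : lo < hi
    · simp only [hlt, if_true]
      have hm : (lo + hi) / 2 < pvTable.length := by omega
      have hget : pvTable.getD ((lo + hi) / 2) ("", "") = pvTable[(lo + hi) / 2] := by
        simp [List.getD_eq_getElem?_getD, List.getElem?_eq_getElem hm]
      have hne : s ≠ (pvTable.getD ((lo + hi) / 2) ("", "")).1 := by
        rw [hget]; exact h _ (List.getElem_mem hm)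
      simp only [hne, if_false]
      split
      · exact ih lo ((lo + hi) / 2) (by omega)
      · exact ih ((lo + hi) / 2 + 1) hi hle
    · simp [hlt]

-- ===== VERDICT (by name: the statement is the Claim_ definition above) =====
theorem get_fmrif_scanner_spec : Claim_equal_get_fmrif_scanner := by
  intro s _
  unfold Spec_get_fmrif_scanner
  by_cases hmem : s ∈ pvTable.map Prod.fst
  · simp only [pvTable, List.map, List.mem_cons, List.not_mem_nil, or_false] at hmem
    rcases hmem with h|h|h|h|h|h|h|h|h|h|h|h|h <;> subst h <;> decide
  · have hne : ∀ p ∈ pvTable, s ≠ p.1 := by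
      intro p hp hEq
      exact hmem (by rw [hEq]; exact List.mem_map_of_mem hp)
    have hb : get_fmrif_scanner_alt s = none :=
      pvBisect_not_found s hne pvTable.length 0 pvTable.length le_rfl
    rw [hb]
    simp only [pvTable, List.map, List.mem_cons, List.not_mem_nil, or_false, not_or] at hmem
    obtain ⟨h0,h1,h2,h3,h4,h5,h6,h7,h8,h9,h10,h11,h12⟩ := hmem
    unfold get_fmrif_scanner
    simp [pvLoopA, pvScanners, h0,h1,h2,h3,h4,h5,h6,h7,h8,h9,h10,h11,h12]
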